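-- pv_equiv track=rewrite | github.com/miliar/Code_Jam_Webscraper | Solutions_python/Problem_203/120.py | get
-- ===== SOURCE A (Python) =====
-- def get(row):
--   ret = ''
--   nb = 0
--   last = ''
--   last_pos = -1
--   for i,c in enumerate(row):
--     if c == '?':
--       nb += 1
--     else:
--       ret += c*(nb+1)
--       nb = 0
--       last = c
--       last_pos = i
--   ret += last*(len(row)-last_pos-1)
--   return ret
-- ===== SOURCE B (Python) =====
-- def get(row):
--     n = len(row)
--     # backward pass: nxt[i] = nearest non-'?' character at index i or later, '' if none
--     nxt = [''] * n
--     cur = ''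
--     for i in range(n - 1, -1, -1):
--         if row[i] != '?':
--             cur = row[i]
--         nxt[i] = cur
--     # forward pass: real chars pass through; '?' copies nxt[i], falling back to last real char
--     out = []
--     last = ''
--     for i, c in enumerate(row):
--         if c != '?':
--             out.append(c)
--             last = c
--         else:
--             out.append(nxt[i] if nxt[i] else last)
--     return ''.join(out)
-- ===== Notes on version B (the rewrite author's own statement) =====
-- stated objective: alternative
-- what changed: A does one run-counting pass accumulating a '?'-run length and flushing on each real char plus a final tail append; B precomputes a right-to-left nearest-non-'?' table and then does a forward pass filling each '?' from the table (falling back to the last real char).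
import Mathlib
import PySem

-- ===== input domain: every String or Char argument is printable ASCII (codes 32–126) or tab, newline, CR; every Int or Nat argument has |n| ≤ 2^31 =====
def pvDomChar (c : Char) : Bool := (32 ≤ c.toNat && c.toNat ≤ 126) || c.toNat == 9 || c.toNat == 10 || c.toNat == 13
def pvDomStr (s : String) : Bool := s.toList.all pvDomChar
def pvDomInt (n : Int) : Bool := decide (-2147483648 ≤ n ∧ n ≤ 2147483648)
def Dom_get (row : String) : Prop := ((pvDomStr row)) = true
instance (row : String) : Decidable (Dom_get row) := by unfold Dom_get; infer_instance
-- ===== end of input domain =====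

-- B replaces A's single run-counting pass by a backward nearest-non-'?' table plus a forward fill pass (alternative decomposition, same value).

-- ===== PORT A =====
-- Python's `last` is '' or a single char: Option Char; `last*k` is optRep.
def optRep (o : Option Char) (n : Nat) : List Char :=
  match o with | some c => List.replicate n c | none => []

-- the for-loop over enumerate(row): state (ret, nb, last, last_pos), i the current index
def getLoop (i : Int) (ret : List Char) (nb : Int) (last : Option Char) (lastPos : Int) :
    List Char → List Char × Int × Option Char × Int
  | [] => (ret, nb, last, lastPos)
  | c :: r =>
    if c = '?' then getLoop (i + 1) ret (nb + 1) last lastPos r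
    else getLoop (i + 1) (ret ++ List.replicate (nb + 1).toNat c) 0 (some c) i r

def get (row : String) : String :=
  String.ofList ((getLoop 0 [] 0 none (-1) row.toList).1
    ++ optRep (getLoop 0 [] 0 none (-1) row.toList).2.2.1
        ((row.toList.length : Int) - (getLoop 0 [] 0 none (-1) row.toList).2.2.2 - 1).toNat)

-- ===== PORT B =====
-- backward pass: nxtTable l at each position = nearest non-'?' char there or later (none = Python's '')
def nxtTable : List Char → List (Option Char)
  | [] => []
  | c :: r => (if c = '?' then (nxtTable r).head?.getD none else some c) :: nxtTable r

-- forward pass over zip of chars with their table entries; `la` = last real char seen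
def fillLoop (la : Option Char) : List (Char × Option Char) → List Char
  | [] => []
  | (c, o) :: r =>
    if c = '?' then
      (match o with
       | some d => [d]
       | none => match la with | some d => [d] | none => []) ++ fillLoop la r
    else c :: fillLoop (some c) r

def get_alt (row : String) : String :=
  String.ofList (fillLoop none (row.toList.zip (nxtTable row.toList)))

-- ===== PRECONDITION & SPEC =====
def Spec_get (row : String) (out : String) : Prop := out = get_alt row
instance (row : String) (out : String) : Decidable (Spec_get row out) := by unfold Spec_get; infer_instance

-- ===== CLAIM (what is proved, stated in full; the proofs are below) =====
def Claim_equal_get : Prop := ∀ (row : String), Dom_get row → Spec_get row (get row)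

-- ===== LEMMAS AND PROOFS =====

-- abstract form of A: nb pending '?'s, la the last real char
def aRec (nb : Nat) (la : Option Char) : List Char → List Char
  | [] => optRep la nb
  | c :: r => if c = '?' then aRec (nb + 1) la r else List.replicate (nb + 1) c ++ aRec 0 (some c) r

def firstNonQ : List Char → Option Char
  | [] => none
  | c :: r => if c = '?' then firstNonQ r else some c

theorem nxt_head (l : List Char) : (nxtTable l).head?.getD none = firstNonQ l := by
  induction l with
  | nil => rfl
  | cons c r ih => by_cases h : c = '?' <;> simp [nxtTable, firstNonQ, h, ih]

theorem optRep_add (o : Option Char) (m n : Nat) :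
    optRep o (m + n) = optRep o m ++ optRep o n := by
  cases o with
  | none => simp [optRep]
  | some c => simp only [optRep, List.replicate_add]

theorem aRec_shift (l : List Char) : ∀ (nb : Nat) (la : Option Char),
    aRec nb la l = optRep (match firstNonQ l with | some d => some d | none => la) nb
      ++ aRec 0 la l := by
  induction l with
  | nil => intro nb la; simp only [aRec, firstNonQ, optRep]; cases la <;> simp
  | cons c r ih =>
    intro nb la
    by_cases h : c = '?'
    · simp only [aRec, if_pos h, firstNonQ, ih (nb + 1) la, ih 1 la]
      rw [optRep_add]
      simp [List.append_assoc]
    · simp only [aRec, if_neg h, firstNonQ, optRep]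
      rw [List.replicate_succ']
      simp

theorem fill_eq (l : List Char) : ∀ (la : Option Char),
    aRec 0 la l = fillLoop la (l.zip (nxtTable l)) := by
  induction l with
  | nil => intro la; simp only [aRec, List.zip_nil_left, fillLoop, optRep]; cases la <;> simp
  | cons c r ih =>
    intro la
    by_cases h : c = '?'
    · have h1 : aRec 0 la (c :: r) = aRec 1 la r := by simp [aRec, h]
      rw [h1, aRec_shift r 1 la]
      simp only [nxtTable, h, if_pos, List.zip_cons_cons, fillLoop, nxt_head, ← ih la]
      cases hf : firstNonQ r <;> cases la <;> simp [optRep]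
    · simp [aRec, h, fillLoop, nxtTable, ih (some c)]

theorem loop_spec (l : List Char) : ∀ (i : Int) (ret : List Char) (nb : Int) (la : Option Char) (lp : Int),
    0 ≤ nb → i - lp - 1 = nb →
    (getLoop i ret nb la lp l).1
      ++ optRep (getLoop i ret nb la lp l).2.2.1
          ((i + (l.length : Int) - (getLoop i ret nb la lp l).2.2.2 - 1).toNat)
      = ret ++ aRec nb.toNat la l := by
  induction l with
  | nil =>
    intro i ret nb la lp h0 hinv
    simp only [getLoop, aRec, List.length_nil]
    congr 2
    omega
  | cons c r ih =>
    intro i ret nb la lp h0 hinv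
    by_cases h : c = '?'
    · simp only [getLoop, if_pos h, List.length_cons]
      have h1 := ih (i + 1) ret (nb + 1) la lp (by omega) (by omega)
      have h2 : (nb + 1).toNat = nb.toNat + 1 := by omega
      have h3 : (i + ((r.length : Int) + 1)) = (i + 1) + (r.length : Int) := by ring
      rw [show ((r.length + 1 : Nat) : Int) = (r.length : Int) + 1 by push_cast; ring, h3, h1, h2]
      simp [aRec, h]
    · simp only [getLoop, if_neg h, List.length_cons]
      have h1 := ih (i + 1) (ret ++ List.replicate (nb + 1).toNat c) 0 (some c) i (by omega) (by omega)
      have h3 : (i + ((r.length : Int) + 1)) = (i + 1) + (r.length : Int) := by ring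
      rw [show ((r.length + 1 : Nat) : Int) = (r.length : Int) + 1 by push_cast; ring, h3, h1]
      have h2 : (nb + 1).toNat = nb.toNat + 1 := by omega
      simp [aRec, h, h2, List.append_assoc]

-- ===== VERDICT (by name: the statement is the Claim_ definition above) =====
theorem get_spec : Claim_equal_get := by
  intro row _
  unfold Spec_get _root_.get get_alt
  have h := loop_spec row.toList 0 [] 0 none (-1) (by omega) (by omega)
  simp only [Int.toNat_zero] at h
  simp only [show ∀ lp : Int, (0 : Int) + (row.toList.length : Int) - lp - 1
      = (row.toList.length : Int) - lp - 1 by intro lp; ring] at h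
  rw [h, fill_eq]
  simp
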